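-- pv_equiv track=rewrite | github.com/martinhenstridge/adventofcode2023 | aoc/day18.py | walk_perimeter
-- ===== SOURCE A (Python) =====
-- def walk_perimeter(sections):
--     length = 0
--     corners = []
--
--     p = (0, 0)
--     for (dr, dc), distance in sections:
--         length += distance
--         r, c = p
--         p = (r + dr * distance, c + dc * distance)
--         corners.append(p)
--
--     return length, corners
-- ===== SOURCE B (Python) =====
-- def _prefix_sums(xs):
--     total = 0
--     out = []
--     for x in xs:
--         total += x
--         out.append(total)
--     return out
--
--
-- def walk_perimeter(sections):
--     length = sum(d for _, d in sections)
--     rows = _prefix_sums([dr * d for (dr, _), d in sections])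
--     cols = _prefix_sums([dc * d for (_, dc), d in sections])
--     return length, list(zip(rows, cols))
-- ===== Notes on version B (the rewrite author's own statement) =====
-- stated objective: alternative
-- what changed: Replaced the single loop carrying (length, current point, corners) with a sum of the distances plus two independent prefix-sum scans over the scaled row/col deltas, zipped into the corner list.
import Mathlib
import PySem

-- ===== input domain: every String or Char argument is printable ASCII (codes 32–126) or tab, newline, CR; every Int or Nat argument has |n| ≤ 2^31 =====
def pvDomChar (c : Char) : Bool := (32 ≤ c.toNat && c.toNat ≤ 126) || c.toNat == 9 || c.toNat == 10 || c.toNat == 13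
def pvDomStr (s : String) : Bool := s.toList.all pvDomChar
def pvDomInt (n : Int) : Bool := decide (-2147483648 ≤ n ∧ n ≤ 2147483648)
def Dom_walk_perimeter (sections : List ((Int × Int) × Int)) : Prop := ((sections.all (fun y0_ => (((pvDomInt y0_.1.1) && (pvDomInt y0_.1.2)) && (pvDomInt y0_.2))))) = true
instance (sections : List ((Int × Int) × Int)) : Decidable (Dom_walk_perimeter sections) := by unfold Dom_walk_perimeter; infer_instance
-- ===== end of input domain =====

-- B replaces A's single accumulator loop by a distance sum plus two prefix-sum scans zipped into corners (same cost, different decomposition).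

-- ===== PORT A =====
def walk_perimeter (sections : List ((Int × Int) × Int)) : Int × (List (Int × Int)) :=
  let st := sections.foldl
    (fun (st : Int × (Int × Int) × List (Int × Int)) sec =>
      let length := st.1
      let p := st.2.1
      let corners := st.2.2
      let dr := sec.1.1
      let dc := sec.1.2
      let distance := sec.2
      let r := p.1
      let c := p.2
      let p' := (r + dr * distance, c + dc * distance)
      (length + distance, p', corners ++ [p']))
    (0, (0, 0), [])
  (st.1, st.2.2)

-- ===== PORT B =====
-- _prefix_sums from Source B: running total appended at each step
def prefixSumsB (xs : List Int) : List Int :=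
  (xs.foldl (fun (st : Int × List Int) x => (st.1 + x, st.2 ++ [st.1 + x])) (0, [])).2

def walk_perimeter_alt (sections : List ((Int × Int) × Int)) : Int × (List (Int × Int)) :=
  let length := (sections.map (fun sec => sec.2)).sum
  let rows := prefixSumsB (sections.map (fun sec => sec.1.1 * sec.2))
  let cols := prefixSumsB (sections.map (fun sec => sec.1.2 * sec.2))
  (length, rows.zip cols)

-- ===== PRECONDITION & SPEC =====
def Spec_walk_perimeter (sections : List ((Int × Int) × Int)) (out : Int × (List (Int × Int))) : Prop := out = walk_perimeter_alt sections
instance (sections : List ((Int × Int) × Int)) (out : Int × (List (Int × Int))) : Decidable (Spec_walk_perimeter sections out) := by unfold Spec_walk_perimeter; infer_instance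

-- ===== CLAIM (what is proved, stated in full; the proofs are below) =====
def Claim_equal_walk_perimeter : Prop := ∀ (sections : List ((Int × Int) × Int)), Dom_walk_perimeter sections → Spec_walk_perimeter sections (walk_perimeter sections)

-- ===== LEMMAS AND PROOFS =====
-- spec-side recursive descriptions used only in the proofs
def pfxFrom (t : Int) : List Int → List Int
  | [] => []
  | x :: xs => (t + x) :: pfxFrom (t + x) xs

def cornersFrom (p : Int × Int) : List ((Int × Int) × Int) → List (Int × Int)
  | [] => []
  | sec :: rest =>
      let p' := (p.1 + sec.1.1 * sec.2, p.2 + sec.1.2 * sec.2)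
      p' :: cornersFrom p' rest

def endPt (p : Int × Int) : List ((Int × Int) × Int) → Int × Int
  | [] => p
  | sec :: rest => endPt (p.1 + sec.1.1 * sec.2, p.2 + sec.1.2 * sec.2) rest

theorem foldA_eq (s : List ((Int × Int) × Int)) :
    ∀ (l : Int) (p : Int × Int) (acc : List (Int × Int)),
    s.foldl
      (fun (st : Int × (Int × Int) × List (Int × Int)) sec =>
        let length := st.1
        let p := st.2.1
        let corners := st.2.2
        let dr := sec.1.1
        let dc := sec.1.2
        let distance := sec.2
        let r := p.1
        let c := p.2
        let p' := (r + dr * distance, c + dc * distance)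
        (length + distance, p', corners ++ [p']))
      (l, p, acc)
    = (l + (s.map (fun sec => sec.2)).sum, endPt p s, acc ++ cornersFrom p s) := by
  induction s with
  | nil => intro l p acc; simp [endPt, cornersFrom]
  | cons sec rest ih =>
      intro l p acc
      simp only [List.foldl_cons, List.map_cons, List.sum_cons, endPt, cornersFrom]
      rw [ih]
      simp [add_assoc]

theorem foldP_eq (xs : List Int) :
    ∀ (t : Int) (out : List Int),
    xs.foldl (fun (st : Int × List Int) x => (st.1 + x, st.2 ++ [st.1 + x])) (t, out)
    = (t + xs.sum, out ++ pfxFrom t xs) := by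
  induction xs with
  | nil => intro t out; simp [pfxFrom]
  | cons x rest ih =>
      intro t out
      simp only [List.foldl_cons, List.sum_cons, pfxFrom]
      rw [ih]
      simp [add_assoc]

theorem prefixSumsB_eq (xs : List Int) : prefixSumsB xs = pfxFrom 0 xs := by
  simp [prefixSumsB, foldP_eq]

theorem zip_pfx_eq_corners (s : List ((Int × Int) × Int)) :
    ∀ (p : Int × Int),
    (pfxFrom p.1 (s.map (fun sec => sec.1.1 * sec.2))).zip
      (pfxFrom p.2 (s.map (fun sec => sec.1.2 * sec.2)))
    = cornersFrom p s := by
  induction s with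
  | nil => intro p; simp [pfxFrom, cornersFrom]
  | cons sec rest ih =>
      intro p
      simp only [List.map_cons, pfxFrom, cornersFrom, List.zip_cons_cons]
      exact congrArg _ (ih (p.1 + sec.1.1 * sec.2, p.2 + sec.1.2 * sec.2))

-- ===== VERDICT (by name: the statement is the Claim_ definition above) =====
theorem walk_perimeter_spec : Claim_equal_walk_perimeter := by
  intro sections _
  unfold Spec_walk_perimeter walk_perimeter walk_perimeter_alt
  rw [foldA_eq, prefixSumsB_eq, prefixSumsB_eq]
  have h := zip_pfx_eq_corners sections (0, 0)
  simp only at h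
  simp [h]
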